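-- pv_equiv track=rewrite | github.com/ishak-dev/Python-Tasks | Vjezba Final II/change words dict.py | function
-- ===== SOURCE A (Python) =====
-- def function(x):
--     y = {}
--     y["sir"] = "matey"
--     y["hotel"]= "fleabag inn"
--     y["boy"]= "matey"
--     y["restroom"]= "head"
--
--     r = x.split()
--
--     for akey in y:
--         for i in range(0,len(r)):
--             if akey == r[i]:
--                 r[i] = y[akey]
--     x = " ".join(r)
--
--     return x
-- ===== SOURCE B (Python) =====
-- def function(x):
--     y = {"sir": "matey", "hotel": "fleabag inn", "boy": "matey", "restroom": "head"}
--     return " ".join(y.get(w, w) for w in x.split())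
-- ===== Notes on version B (the rewrite author's own statement) =====
-- stated objective: idiomatic
-- what changed: Replaces the key-loop with a nested index-scan over the word list (one full pass per dictionary key, with in-place assignment) by a single pass over the words that looks each word up in the dict (y.get(w, w)); correct because no substitution value is itself a key.
import Mathlib
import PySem

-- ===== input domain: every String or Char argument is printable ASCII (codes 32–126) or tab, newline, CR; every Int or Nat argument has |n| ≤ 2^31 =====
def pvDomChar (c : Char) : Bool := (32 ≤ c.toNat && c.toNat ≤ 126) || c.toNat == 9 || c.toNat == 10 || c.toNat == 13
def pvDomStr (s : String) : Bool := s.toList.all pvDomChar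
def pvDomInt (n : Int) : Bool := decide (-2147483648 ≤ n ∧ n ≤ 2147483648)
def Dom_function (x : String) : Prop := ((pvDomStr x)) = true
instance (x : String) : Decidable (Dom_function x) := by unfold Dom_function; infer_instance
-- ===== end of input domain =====

-- B replaces A's per-key full scans of the word list by one pass with a dict lookup (idiomatic; same output).

-- the substitution dict both Pythons build (four inserts, insertion order kept)
def pvDict : PySem.Dict String String :=
  ((((PySem.Dict.empty).insert "sir" "matey").insert "hotel" "fleabag inn").insert "boy" "matey").insert "restroom" "head"

-- ===== PORT A =====
def function (x : String) : String :=
  let y := pvDict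
  let r := PySem.Str.split₀ x
  let r := y.keys.foldl (fun r akey =>
    (PySem.List.pyRange 0 (PySem.List.len r) 1).foldl
      (fun r i => if akey = PySem.List.pyGetD r i "" then PySem.List.pySetD r i (y.getD akey "") else r) r) r
  PySem.Str.join " " r

-- ===== PORT B =====
def function_alt (x : String) : String :=
  let y := pvDict
  PySem.Str.join " " ((PySem.Str.split₀ x).map (fun w => y.getD w w))

-- ===== PRECONDITION & SPEC =====
def Spec_function (x : String) (out : String) : Prop := out = function_alt x
instance (x : String) (out : String) : Decidable (Spec_function x out) := by unfold Spec_function; infer_instance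

-- ===== CLAIM (what is proved, stated in full; the proofs are below) =====
def Claim_equal_function : Prop := ∀ (x : String), Dom_function x → Spec_function x (function x)

-- ===== LEMMAS AND PROOFS =====

-- A's inner index loop over range(0, len(r)) replaces every occurrence of k by v: it is a map.
theorem pv_aux (k v : String) (n : Nat) (s : List String) (h : n ≤ s.length) :
    (PySem.List.pyRange 0 (n : Int) 1).foldl
      (fun t i => if k = PySem.List.pyGetD t i "" then PySem.List.pySetD t i v else t) s
    = (s.take n).map (fun w => if w = k then v else w) ++ s.drop n := by
  induction n with
  | zero => simp
  | succ n ih =>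
    have hn2 : n < s.length := h
    have hcast : ((n + 1 : Nat) : Int) = (n : Int) + 1 := by push_cast; ring
    rw [hcast, PySem.List.pyRange_one_succ_right (by positivity), List.foldl_append,
      ih (Nat.le_of_succ_le h)]
    simp only [List.foldl_cons, List.foldl_nil]
    have hlen : ((s.take n).map (fun w => if w = k then v else w)).length = n := by
      simp [Nat.min_eq_left (Nat.le_of_lt hn2)]
    have hdrop : s.drop n = s[n] :: s.drop (n + 1) := List.drop_eq_getElem_cons hn2
    have hget : PySem.List.pyGetD
        ((s.take n).map (fun w => if w = k then v else w) ++ s.drop n) ((n : Nat) : Int) "" = s[n] := by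
      rw [PySem.List.pyGetD_natCast, hdrop, List.getD_eq_getElem?_getD,
        List.getElem?_append_right (Nat.le_of_eq hlen)]
      simp [Nat.min_eq_left (Nat.le_of_lt hn2), List.getElem?_eq_getElem hn2]
    have htake : s.take (n + 1) = s.take n ++ [s[n]] := by
      rw [List.take_add_one]; simp [List.getElem?_eq_getElem hn2]
    rw [hget, htake, List.map_append, List.append_assoc]
    by_cases hk : k = s[n]
    · rw [if_pos hk, PySem.List.pySetD_natCast, hdrop, List.set_append_right _ _ (Nat.le_of_eq hlen)]
      simp [hk.symm, Nat.min_eq_left (Nat.le_of_lt hn2)]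
    · rw [if_neg hk]
      simp only [List.map_cons, List.map_nil, List.singleton_append]
      rw [if_neg (fun hh : s[n] = k => hk hh.symm), hdrop]

-- range over the full length: the whole list is mapped
theorem pv_inner (k v : String) (s : List String) :
    (PySem.List.pyRange 0 (PySem.List.len s) 1).foldl
      (fun t i => if k = PySem.List.pyGetD t i "" then PySem.List.pySetD t i v else t) s
    = s.map (fun w => if w = k then v else w) := by
  have := pv_aux k v s.length s (Nat.le_refl _)
  simpa [PySem.List.len] using this

-- no substitution value is a key, so the four sequential replacements equal one dict lookup
theorem pv_pointwise (w : String) :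
    (if (if (if (if w = "sir" then pvDict.getD "sir" "" else w) = "hotel" then pvDict.getD "hotel" "" else
      (if w = "sir" then pvDict.getD "sir" "" else w)) = "boy" then pvDict.getD "boy" "" else
      (if (if w = "sir" then pvDict.getD "sir" "" else w) = "hotel" then pvDict.getD "hotel" "" else
      (if w = "sir" then pvDict.getD "sir" "" else w))) = "restroom" then pvDict.getD "restroom" "" else
      (if (if (if w = "sir" then pvDict.getD "sir" "" else w) = "hotel" then pvDict.getD "hotel" "" else
      (if w = "sir" then pvDict.getD "sir" "" else w)) = "boy" then pvDict.getD "boy" "" else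
      (if (if w = "sir" then pvDict.getD "sir" "" else w) = "hotel" then pvDict.getD "hotel" "" else
      (if w = "sir" then pvDict.getD "sir" "" else w))))
    = pvDict.getD w w := by
  by_cases h1 : w = "sir"
  · subst h1; decide
  by_cases h2 : w = "hotel"
  · subst h2; decide
  by_cases h3 : w = "boy"
  · subst h3; decide
  by_cases h4 : w = "restroom"
  · subst h4; decide
  have e1 : ("sir" == w) = false := beq_eq_false_iff_ne.mpr fun hh => h1 hh.symm
  have e2 : ("hotel" == w) = false := beq_eq_false_iff_ne.mpr fun hh => h2 hh.symm
  have e3 : ("boy" == w) = false := beq_eq_false_iff_ne.mpr fun hh => h3 hh.symm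
  have e4 : ("restroom" == w) = false := beq_eq_false_iff_ne.mpr fun hh => h4 hh.symm
  rw [if_neg h1, if_neg h2, if_neg h3, if_neg h4]
  have hd : pvDict = PySem.Dict.mk [("sir", "matey"), ("hotel", "fleabag inn"),
      ("boy", "matey"), ("restroom", "head")] := by decide
  rw [hd]
  simp [PySem.Dict.getD, PySem.Dict.get?, e1, e2, e3, e4]

-- ===== VERDICT (by name: the statement is the Claim_ definition above) =====
theorem function_spec : Claim_equal_function := by
  intro x _
  unfold Spec_function function function_alt
  have hkeys : pvDict.keys = ["sir", "hotel", "boy", "restroom"] := by decide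
  simp only [hkeys, List.foldl_cons, List.foldl_nil]
  rw [pv_inner, pv_inner, pv_inner, pv_inner, List.map_map, List.map_map, List.map_map]
  refine congrArg _ (List.map_congr_left fun w _ => ?_)
  simpa using pv_pointwise w
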